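-- pv_equiv track=rewrite | github.com/pypi-data/pypi-mirror-99 | packages/dkist-fits-specifications/dkist_fits_specifications-0.9-py3-none-any.whl/dkist_fits_specifications/utils.py | expand_keys
-- ===== SOURCE A (Python) =====
-- from typing import Any, Dict, List, Tuple, Optional, cast, Callable
--
-- def expand_keys(naxis: int, keys: List[str]) -> List[str]:
--     naxis_range = range(1, naxis + 1)
--     output_keys = []
--     for key in keys:
--         if "n" in key:
--             output_keys += [key.replace("n", str(i)) for i in naxis_range]
--         elif "i" in key:
--             output_keys += [key.replace("i", str(i)) for i in naxis_range]
--         elif "j" in key: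
--             output_keys += [key.replace("j", str(i)) for i in naxis_range]
--         else:
--             output_keys += [key]
--     if output_keys != keys:
--         return expand_keys(naxis, output_keys)
--     return output_keys
-- ===== SOURCE B (Python) =====
-- def expand_keys(naxis, keys):
--     out = []
--     for key in keys:
--         parts = [key]
--         for letter in "nij":
--             if letter in key:
--                 parts = [p.replace(letter, str(a)) for p in parts for a in range(1, naxis + 1)]
--         out.extend(parts)
--     return out
-- ===== Notes on version B (the rewrite author's own statement) =====
-- stated objective: simpler
-- what changed: A repeatedly rescans and rebuilds the whole key list until a fixpoint (one recursion level per placeholder letter); B makes a single pass that, per key, expands the letters n, i, j directly with nested comprehensions.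
import Mathlib
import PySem

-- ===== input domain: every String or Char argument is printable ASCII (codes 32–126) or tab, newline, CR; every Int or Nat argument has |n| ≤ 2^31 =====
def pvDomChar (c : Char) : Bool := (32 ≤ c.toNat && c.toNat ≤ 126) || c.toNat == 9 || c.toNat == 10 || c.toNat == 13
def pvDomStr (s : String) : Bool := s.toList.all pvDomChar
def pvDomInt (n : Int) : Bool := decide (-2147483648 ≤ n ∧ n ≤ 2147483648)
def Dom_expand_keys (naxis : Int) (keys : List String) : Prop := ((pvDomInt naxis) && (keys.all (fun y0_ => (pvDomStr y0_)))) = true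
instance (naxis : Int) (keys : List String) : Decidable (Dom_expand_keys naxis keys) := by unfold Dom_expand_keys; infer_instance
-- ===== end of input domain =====

-- B replaces A's repeat-a-pass-until-fixpoint recursion over the whole key list by a single
-- pass that expands each key's placeholder letters n, i, j directly (objective: simpler).

-- ===== PORT A =====
-- Everything from here to pvMeasure_decreases exists only to justify termination of A's
-- fixpoint recursion; the port cites pvMeasure_decreases by name in its decreasing_by.

/-- number of distinct placeholder letters occurring in a key -/
def pvCnt (s : List Char) : Nat :=
  (if 'n' ∈ s then 1 else 0) + (if 'i' ∈ s then 1 else 0) + (if 'j' ∈ s then 1 else 0)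

/-- termination measure: the maximal pvCnt over the keys -/
def pvMeasure (keys : List String) : Nat := (keys.map (fun s => pvCnt s.toList)).foldr max 0

/-- the list a single iteration of A's loop appends for one key -/
def pvStep (naxis : Int) (key : String) : List String :=
  if PySem.Str.isIn "n" key then
    (PySem.List.pyRange 1 (naxis + 1) 1).map (fun i => PySem.Str.replace key "n" (PySem.Int.toStr i))
  else if PySem.Str.isIn "i" key then
    (PySem.List.pyRange 1 (naxis + 1) 1).map (fun i => PySem.Str.replace key "i" (PySem.Int.toStr i))
  else if PySem.Str.isIn "j" key then
    (PySem.List.pyRange 1 (naxis + 1) 1).map (fun i => PySem.Str.replace key "j" (PySem.Int.toStr i))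
  else [key]

/-- one pass of A's `for key in keys` loop (transliteration of the loop) -/
def expandPass (naxis : Int) (keys : List String) : List String :=
  keys.foldl (fun output_keys key =>
    if PySem.Str.isIn "n" key then
      output_keys ++ (PySem.List.pyRange 1 (naxis + 1) 1).map (fun i => PySem.Str.replace key "n" (PySem.Int.toStr i))
    else if PySem.Str.isIn "i" key then
      output_keys ++ (PySem.List.pyRange 1 (naxis + 1) 1).map (fun i => PySem.Str.replace key "i" (PySem.Int.toStr i))
    else if PySem.Str.isIn "j" key then
      output_keys ++ (PySem.List.pyRange 1 (naxis + 1) 1).map (fun i => PySem.Str.replace key "j" (PySem.Int.toStr i))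
    else output_keys ++ [key]) []

lemma expandPass_eq (naxis : Int) (keys : List String) :
    expandPass naxis keys = keys.flatMap (pvStep naxis) := by
  unfold expandPass
  have hb : (fun (output_keys : List String) (key : String) =>
      if PySem.Str.isIn "n" key then
        output_keys ++ (PySem.List.pyRange 1 (naxis + 1) 1).map (fun i => PySem.Str.replace key "n" (PySem.Int.toStr i))
      else if PySem.Str.isIn "i" key then
        output_keys ++ (PySem.List.pyRange 1 (naxis + 1) 1).map (fun i => PySem.Str.replace key "i" (PySem.Int.toStr i))
      else if PySem.Str.isIn "j" key then
        output_keys ++ (PySem.List.pyRange 1 (naxis + 1) 1).map (fun i => PySem.Str.replace key "j" (PySem.Int.toStr i))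
      else output_keys ++ [key])
      = (fun output_keys key => output_keys ++ pvStep naxis key) := by
    funext o k
    unfold pvStep
    split_ifs <;> rfl
  rw [hb, PySem.List.foldl_append_eq_flatMap, List.nil_append]

lemma pvIsIn_lit {c : Char} {sub : String} (h : sub.toList = [c]) (s : String) :
    PySem.Str.isIn sub s = true ↔ c ∈ s.toList := by
  rw [PySem.Str.isIn_iff_infix sub s, h, List.singleton_infix_iff]

lemma pvIsIn_n (s : String) : PySem.Str.isIn "n" s = true ↔ 'n' ∈ s.toList :=
  pvIsIn_lit (rfl : "n".toList = ['n']) s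
lemma pvIsIn_i (s : String) : PySem.Str.isIn "i" s = true ↔ 'i' ∈ s.toList :=
  pvIsIn_lit (rfl : "i".toList = ['i']) s
lemma pvIsIn_j (s : String) : PySem.Str.isIn "j" s = true ↔ 'j' ∈ s.toList :=
  pvIsIn_lit (rfl : "j".toList = ['j']) s

/-- `replace.go` on a single-character pattern is a per-character flatMap -/
lemma pvRepGo (c : Char) (new : List Char) :
    ∀ (l : List Char) (fuel : Nat) (acc : List Char), l.length ≤ fuel →
      PySem.Chars.replace.go [c] new fuel l acc
        = acc.reverse ++ l.flatMap (fun x => if x = c then new else [x]) := by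
  intro l
  induction l with
  | nil => intro fuel acc _; cases fuel <;> simp [PySem.Chars.replace.go]
  | cons x t ih =>
    intro fuel acc hlen
    cases fuel with
    | zero => simp at hlen
    | succ f =>
      simp only [PySem.Chars.replace.go]
      by_cases hxc : c = x
      · subst hxc
        rw [if_pos (by simp [List.isPrefixOf])]
        simp only [List.length_singleton, List.drop_one, List.tail_cons]
        rw [ih f (new.reverse ++ acc) (by simpa using Nat.le_of_succ_le_succ hlen)]
        simp
      · rw [if_neg (by simp [List.isPrefixOf, hxc])]
        rw [ih f (x :: acc) (by simpa using Nat.le_of_succ_le_succ hlen)]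
        simp [Ne.symm hxc]

lemma pvReplace_single (s : List Char) (c : Char) (new : List Char) :
    PySem.Chars.replace s [c] new = s.flatMap (fun x => if x = c then new else [x]) := by
  show (if ([c] : List Char).isEmpty then _ else PySem.Chars.replace.go [c] new s.length s []) = _
  rw [if_neg (by simp)]
  rw [pvRepGo c new s s.length [] le_rfl]
  simp

lemma pvMem_replace_single {s new : List Char} {c d : Char} :
    d ∈ PySem.Chars.replace s [c] new ↔ (d ∈ s ∧ d ≠ c) ∨ (c ∈ s ∧ d ∈ new) := by
  rw [pvReplace_single, List.mem_flatMap]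
  constructor
  · rintro ⟨x, hx, hd⟩
    by_cases hxc : x = c
    · subst hxc; rw [if_pos rfl] at hd; exact Or.inr ⟨hx, hd⟩
    · simp only [if_neg hxc, List.mem_singleton] at hd; subst hd; exact Or.inl ⟨hx, hxc⟩
  · rintro (⟨hd, hne⟩ | ⟨hc, hdn⟩)
    · exact ⟨d, hd, by simp [if_neg hne]⟩
    · exact ⟨c, hc, by simp [hdn]⟩

lemma pvToDigitsCore_digits :
    ∀ (fuel n : Nat) (acc : List Char), (∀ d ∈ acc, d.isDigit = true) →
      ∀ d ∈ Nat.toDigitsCore 10 fuel n acc, d.isDigit = true := by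
  intro fuel
  induction fuel with
  | zero => intro n acc h; simpa [Nat.toDigitsCore] using h
  | succ f ih =>
    intro n acc h
    have hdc : (Nat.digitChar (n % 10)).isDigit = true := by
      have : n % 10 < 10 := Nat.mod_lt _ (by norm_num)
      interval_cases h : n % 10 <;> decide
    simp only [Nat.toDigitsCore]
    split
    · intro d hd
      rcases List.mem_cons.mp hd with rfl | hd
      · exact hdc
      · exact h d hd
    · exact ih _ _ (fun d hd => by rcases List.mem_cons.mp hd with rfl | hd; exact hdc; exact h d hd)

lemma pvToChars_digits {a : Int} (ha : 0 ≤ a) : ∀ d ∈ PySem.Int.toChars a, d.isDigit = true := by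
  unfold PySem.Int.toChars
  rw [if_neg (by omega)]
  exact pvToDigitsCore_digits _ _ [] (by simp)

/-- membership in `key.replace(c, str(a))` for a non-digit character `d` -/
lemma pvMem_replace_letter {p : String} {c d : Char} {a : Int} (ha : 0 ≤ a)
    (hd : d.isDigit = false) :
    d ∈ (PySem.Str.replace p (String.ofList [c]) (PySem.Int.toStr a)).toList
      ↔ (d ∈ p.toList ∧ d ≠ c) := by
  have hb : (PySem.Str.replace p (String.ofList [c]) (PySem.Int.toStr a)).toList
      = PySem.Chars.replace p.toList [c] (PySem.Int.toChars a) := by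
    simp only [PySem.Str.toList_replace, String.toList_ofList, PySem.Int.toList_toStr]
  rw [hb, pvMem_replace_single]
  have hnd : d ∉ PySem.Int.toChars a := fun h => by rw [pvToChars_digits ha d h] at hd; cases hd
  constructor
  · rintro (h | ⟨_, h⟩)
    · exact h
    · exact absurd h hnd
  · exact Or.inl

lemma pvLe_foldr_max {l : List String} {k : String} (hk : k ∈ l) :
    pvCnt k.toList ≤ pvMeasure l := by
  unfold pvMeasure
  induction l with
  | nil => cases hk
  | cons x t ih =>
    rcases List.mem_cons.mp hk with rfl | hk
    · simp only [List.map_cons, List.foldr_cons]; omega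
    · have := ih hk; simp only [List.map_cons, List.foldr_cons]; omega

lemma pvMeasure_lt_of {l : List String} {m : Nat} (hm : 0 < m)
    (h : ∀ s ∈ l, pvCnt s.toList < m) : pvMeasure l < m := by
  unfold pvMeasure
  induction l with
  | nil => simpa using hm
  | cons x t ih =>
    have hx := h x (List.mem_cons_self)
    have ht := ih (fun s hs => h s (List.mem_cons_of_mem _ hs))
    simp only [List.map_cons, List.foldr_cons]
    omega

lemma pvStep_of_cnt_zero (naxis : Int) {k : String} (h : pvCnt k.toList = 0) :
    pvStep naxis k = [k] := by
  have hn : 'n' ∉ k.toList := by intro hm; simp [pvCnt, hm] at h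
  have hi : 'i' ∉ k.toList := by intro hm; simp [pvCnt, hm] at h
  have hj : 'j' ∉ k.toList := by intro hm; simp [pvCnt, hm] at h
  unfold pvStep
  rw [if_neg, if_neg, if_neg]
  · exact fun hc => hj ((pvIsIn_j k).mp hc)
  · exact fun hc => hi ((pvIsIn_i k).mp hc)
  · exact fun hc => hn ((pvIsIn_n k).mp hc)

/-- a key expanded by pvStep loses its first placeholder letter and gains none -/
lemma pvCnt_step_lt {naxis : Int} {k s' : String} (hs : s' ∈ pvStep naxis k)
    (hk : pvCnt k.toList ≠ 0) : pvCnt s'.toList < pvCnt k.toList := by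
  unfold pvStep at hs
  split_ifs at hs with h1 h2 h3
  · obtain ⟨a, ha, rfl⟩ := List.mem_map.mp hs
    have ha0 : (0:Int) ≤ a := by
      have := (PySem.List.mem_pyRange_one.mp ha).1; omega
    have hn' := (pvIsIn_n k).mp h1
    have en : 'n' ∈ (PySem.Str.replace k "n" (PySem.Int.toStr a)).toList ↔ ('n' ∈ k.toList ∧ 'n' ≠ 'n') := pvMem_replace_letter ha0 (by decide)
    have ei : 'i' ∈ (PySem.Str.replace k "n" (PySem.Int.toStr a)).toList ↔ ('i' ∈ k.toList ∧ 'i' ≠ 'n') := pvMem_replace_letter ha0 (by decide)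
    have ej : 'j' ∈ (PySem.Str.replace k "n" (PySem.Int.toStr a)).toList ↔ ('j' ∈ k.toList ∧ 'j' ≠ 'n') := pvMem_replace_letter ha0 (by decide)
    simp only [pvCnt, en, ei, ej, ne_eq]
    by_cases ci : 'i' ∈ k.toList <;> by_cases cj : 'j' ∈ k.toList <;> simp [ci, cj, hn']
  · obtain ⟨a, ha, rfl⟩ := List.mem_map.mp hs
    have ha0 : (0:Int) ≤ a := by
      have := (PySem.List.mem_pyRange_one.mp ha).1; omega
    have hi' := (pvIsIn_i k).mp h2
    have hn' : 'n' ∉ k.toList := fun hm => h1 ((pvIsIn_n k).mpr hm)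
    have en : 'n' ∈ (PySem.Str.replace k "i" (PySem.Int.toStr a)).toList ↔ ('n' ∈ k.toList ∧ 'n' ≠ 'i') := pvMem_replace_letter ha0 (by decide)
    have ei : 'i' ∈ (PySem.Str.replace k "i" (PySem.Int.toStr a)).toList ↔ ('i' ∈ k.toList ∧ 'i' ≠ 'i') := pvMem_replace_letter ha0 (by decide)
    have ej : 'j' ∈ (PySem.Str.replace k "i" (PySem.Int.toStr a)).toList ↔ ('j' ∈ k.toList ∧ 'j' ≠ 'i') := pvMem_replace_letter ha0 (by decide)
    simp only [pvCnt, en, ei, ej, ne_eq]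
    by_cases cj : 'j' ∈ k.toList <;> simp [cj, hi', hn']
  · obtain ⟨a, ha, rfl⟩ := List.mem_map.mp hs
    have ha0 : (0:Int) ≤ a := by
      have := (PySem.List.mem_pyRange_one.mp ha).1; omega
    have hj' := (pvIsIn_j k).mp h3
    have hn' : 'n' ∉ k.toList := fun hm => h1 ((pvIsIn_n k).mpr hm)
    have hi' : 'i' ∉ k.toList := fun hm => h2 ((pvIsIn_i k).mpr hm)
    have en : 'n' ∈ (PySem.Str.replace k "j" (PySem.Int.toStr a)).toList ↔ ('n' ∈ k.toList ∧ 'n' ≠ 'j') := pvMem_replace_letter ha0 (by decide)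
    have ei : 'i' ∈ (PySem.Str.replace k "j" (PySem.Int.toStr a)).toList ↔ ('i' ∈ k.toList ∧ 'i' ≠ 'j') := pvMem_replace_letter ha0 (by decide)
    have ej : 'j' ∈ (PySem.Str.replace k "j" (PySem.Int.toStr a)).toList ↔ ('j' ∈ k.toList ∧ 'j' ≠ 'j') := pvMem_replace_letter ha0 (by decide)
    simp only [pvCnt, en, ei, ej, ne_eq]
    simp [hi', hn', hj']
  · have hn' : 'n' ∉ k.toList := fun hm => h1 ((pvIsIn_n k).mpr hm)
    have hi' : 'i' ∉ k.toList := fun hm => h2 ((pvIsIn_i k).mpr hm)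
    have hj' : 'j' ∉ k.toList := fun hm => h3 ((pvIsIn_j k).mpr hm)
    exact absurd (by simp [pvCnt, hn', hi', hj']) hk

lemma pvPass_of_all_zero (naxis : Int) {keys : List String}
    (h : ∀ k ∈ keys, pvCnt k.toList = 0) : expandPass naxis keys = keys := by
  rw [expandPass_eq, List.flatMap_congr (fun k hk => pvStep_of_cnt_zero naxis (h k hk))]
  exact List.flatMap_singleton' keys

lemma pvMeasure_decreases (naxis : Int) (keys : List String)
    (h : expandPass naxis keys ≠ keys) :
    pvMeasure (expandPass naxis keys) < pvMeasure keys := by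
  rw [expandPass_eq] at h ⊢
  by_cases h0 : ∀ k ∈ keys, pvCnt k.toList = 0
  · exact absurd ((expandPass_eq naxis keys).symm.trans (pvPass_of_all_zero naxis h0)) h
  · push_neg at h0
    obtain ⟨k0, hk0, hc0⟩ := h0
    have hm : 0 < pvMeasure keys :=
      lt_of_lt_of_le (Nat.pos_of_ne_zero hc0) (pvLe_foldr_max hk0)
    apply pvMeasure_lt_of hm
    intro s' hs'
    obtain ⟨k, hk, hsk⟩ := List.mem_flatMap.mp hs'
    by_cases hck : pvCnt k.toList = 0
    · rw [pvStep_of_cnt_zero naxis hck] at hsk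
      rcases List.mem_singleton.mp hsk with rfl
      omega
    · exact lt_of_lt_of_le (pvCnt_step_lt hsk hck) (pvLe_foldr_max hk)

def expand_keys (naxis : Int) (keys : List String) : List String :=
  let output_keys := expandPass naxis keys
  if h : output_keys = keys then output_keys
  else expand_keys naxis output_keys
termination_by pvMeasure keys
decreasing_by exact pvMeasure_decreases naxis keys h

-- ===== PORT B =====
def expand_keys_alt (naxis : Int) (keys : List String) : List String :=
  keys.foldl (fun out key =>
    out ++ (['n', 'i', 'j'].foldl (fun parts letter =>
      if PySem.Str.isIn (String.ofList [letter]) key then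
        parts.flatMap (fun p =>
          (PySem.List.pyRange 1 (naxis + 1) 1).map (fun a =>
            PySem.Str.replace p (String.ofList [letter]) (PySem.Int.toStr a)))
      else parts) [key])) []

-- ===== PRECONDITION & SPEC =====
def Spec_expand_keys (naxis : Int) (keys : List String) (out : List String) : Prop := out = expand_keys_alt naxis keys
instance (naxis : Int) (keys : List String) (out : List String) : Decidable (Spec_expand_keys naxis keys out) := by unfold Spec_expand_keys; infer_instance

-- ===== CLAIM (what is proved, stated in full; the proofs are below) =====
def Claim_equal_expand_keys : Prop := ∀ (naxis : Int) (keys : List String), Dom_expand_keys naxis keys → Spec_expand_keys naxis keys (expand_keys naxis keys)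

-- ===== LEMMAS AND PROOFS =====

/-- the full expansion of one key over a list of placeholder letters (first letter outermost) -/
def fullExp (naxis : Int) : List Char → String → List String
  | [], key => [key]
  | l :: ls, key =>
    if l ∈ key.toList then
      (PySem.List.pyRange 1 (naxis + 1) 1).flatMap (fun a =>
        fullExp naxis ls (PySem.Str.replace key (String.ofList [l]) (PySem.Int.toStr a)))
    else fullExp naxis ls key

/-- B's inner loop over the letters, as a function of one key -/
def altKey (naxis : Int) (key : String) : List String :=
  ['n', 'i', 'j'].foldl (fun parts letter =>
    if PySem.Str.isIn (String.ofList [letter]) key then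
      parts.flatMap (fun p =>
        (PySem.List.pyRange 1 (naxis + 1) 1).map (fun a =>
          PySem.Str.replace p (String.ofList [letter]) (PySem.Int.toStr a)))
    else parts) [key]

lemma expand_keys_alt_eq (naxis : Int) (keys : List String) :
    expand_keys_alt naxis keys = keys.flatMap (altKey naxis) := by
  unfold expand_keys_alt altKey
  rw [PySem.List.foldl_append_eq_flatMap, List.nil_append]

lemma altFold_eq (naxis : Int) (key : String) :
    ∀ (ls : List Char) (parts : List String), ls.Nodup →
      (∀ l ∈ ls, l.isDigit = false) →
      (∀ p ∈ parts, ∀ l ∈ ls, (l ∈ p.toList ↔ l ∈ key.toList)) →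
      ls.foldl (fun parts letter =>
        if PySem.Str.isIn (String.ofList [letter]) key then
          parts.flatMap (fun p =>
            (PySem.List.pyRange 1 (naxis + 1) 1).map (fun a =>
              PySem.Str.replace p (String.ofList [letter]) (PySem.Int.toStr a)))
        else parts) parts
      = parts.flatMap (fullExp naxis ls) := by
  intro ls
  induction ls with
  | nil =>
    intro parts _ _ _
    rw [List.foldl_nil]
    exact (List.flatMap_singleton' parts).symm
  | cons l ls ih =>
    intro parts hnd hdig hinv
    have hndl : l ∉ ls := (List.nodup_cons.mp hnd).1
    have hnd' : ls.Nodup := (List.nodup_cons.mp hnd).2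
    have hdig' : ∀ x ∈ ls, x.isDigit = false := fun x hx => hdig x (List.mem_cons_of_mem _ hx)
    rw [List.foldl_cons]
    by_cases hl : l ∈ key.toList
    · rw [if_pos ((pvIsIn_lit (String.toList_ofList : (String.ofList [l]).toList = [l]) key).mpr hl)]
      have hinv2 : ∀ p' ∈ parts.flatMap (fun p =>
            (PySem.List.pyRange 1 (naxis + 1) 1).map (fun a =>
              PySem.Str.replace p (String.ofList [l]) (PySem.Int.toStr a))),
          ∀ l' ∈ ls, (l' ∈ p'.toList ↔ l' ∈ key.toList) := by
        intro p' hp' l' hl'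
        obtain ⟨p, hp, hgp⟩ := List.mem_flatMap.mp hp'
        obtain ⟨a, ha, rfl⟩ := List.mem_map.mp hgp
        have ha0 : (0:Int) ≤ a := by
          have := (PySem.List.mem_pyRange_one.mp ha).1; omega
        have hne : l' ≠ l := fun e => hndl (e ▸ hl')
        rw [pvMem_replace_letter ha0 (hdig' l' hl')]
        constructor
        · rintro ⟨hm, _⟩; exact (hinv p hp l' (List.mem_cons_of_mem _ hl')).mp hm
        · intro hm; exact ⟨(hinv p hp l' (List.mem_cons_of_mem _ hl')).mpr hm, hne⟩
      rw [ih _ hnd' hdig' hinv2, List.flatMap_assoc]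
      apply List.flatMap_congr
      intro p hp
      have hlp : l ∈ p.toList := (hinv p hp l List.mem_cons_self).mpr hl
      rw [List.flatMap_map]
      show _ = fullExp naxis (l :: ls) p
      rw [fullExp, if_pos hlp]
    · rw [if_neg (fun hc => hl ((pvIsIn_lit (String.toList_ofList : (String.ofList [l]).toList = [l]) key).mp hc))]
      rw [ih parts hnd' hdig' (fun p hp l' hl' => hinv p hp l' (List.mem_cons_of_mem _ hl'))]
      apply List.flatMap_congr
      intro p hp
      have hlp : l ∉ p.toList := fun hm => hl ((hinv p hp l List.mem_cons_self).mp hm)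
      rw [show fullExp naxis (l :: ls) p = fullExp naxis ls p from by rw [fullExp, if_neg hlp]]

set_option maxRecDepth 4096 in
lemma altKey_eq_fullExp (naxis : Int) (key : String) :
    altKey naxis key = fullExp naxis ['n', 'i', 'j'] key := by
  unfold altKey
  rw [altFold_eq naxis key ['n', 'i', 'j'] [key] (by decide) (by intro l hl; fin_cases hl <;> rfl)
    (fun p hp l _ => by rcases List.mem_singleton.mp hp with rfl; exact Iff.rfl)]
  simp

lemma pvFullExp_skip {naxis : Int} {l : Char} {ls : List Char} {k : String}
    (h : l ∉ k.toList) : fullExp naxis (l :: ls) k = fullExp naxis ls k := by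
  rw [fullExp, if_neg h]

lemma pvStep_fullExp (naxis : Int) (key : String) :
    (pvStep naxis key).flatMap (fullExp naxis ['n', 'i', 'j'])
      = fullExp naxis ['n', 'i', 'j'] key := by
  have hlitn : ("n" : String) = String.ofList ['n'] := rfl
  have hliti : ("i" : String) = String.ofList ['i'] := rfl
  have hlitj : ("j" : String) = String.ofList ['j'] := rfl
  unfold pvStep
  split_ifs with h1 h2 h3
  · have hn := (pvIsIn_n key).mp h1
    rw [List.flatMap_map, hlitn]
    conv_rhs => rw [fullExp, if_pos hn]
    apply List.flatMap_congr
    intro a ha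
    have ha0 : (0:Int) ≤ a := by
      have := (PySem.List.mem_pyRange_one.mp ha).1; omega
    have hnn : 'n' ∉ (PySem.Str.replace key (String.ofList ['n']) (PySem.Int.toStr a)).toList := by
      rw [pvMem_replace_letter ha0 (by decide)]; rintro ⟨_, hne⟩; exact hne rfl
    exact pvFullExp_skip hnn
  · have hi := (pvIsIn_i key).mp h2
    have hn : 'n' ∉ key.toList := fun hm => h1 ((pvIsIn_n key).mpr hm)
    rw [List.flatMap_map, hliti]
    conv_rhs => rw [pvFullExp_skip hn, fullExp, if_pos hi]
    apply List.flatMap_congr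
    intro a ha
    have ha0 : (0:Int) ≤ a := by
      have := (PySem.List.mem_pyRange_one.mp ha).1; omega
    have hnn : 'n' ∉ (PySem.Str.replace key (String.ofList ['i']) (PySem.Int.toStr a)).toList := by
      rw [pvMem_replace_letter ha0 (by decide)]; rintro ⟨hm, _⟩; exact hn hm
    have hni : 'i' ∉ (PySem.Str.replace key (String.ofList ['i']) (PySem.Int.toStr a)).toList := by
      rw [pvMem_replace_letter ha0 (by decide)]; rintro ⟨_, hne⟩; exact hne rfl
    rw [pvFullExp_skip hnn, pvFullExp_skip hni]
  · have hj := (pvIsIn_j key).mp h3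
    have hn : 'n' ∉ key.toList := fun hm => h1 ((pvIsIn_n key).mpr hm)
    have hi : 'i' ∉ key.toList := fun hm => h2 ((pvIsIn_i key).mpr hm)
    rw [List.flatMap_map, hlitj]
    conv_rhs => rw [pvFullExp_skip hn, pvFullExp_skip hi, fullExp, if_pos hj]
    apply List.flatMap_congr
    intro a ha
    have ha0 : (0:Int) ≤ a := by
      have := (PySem.List.mem_pyRange_one.mp ha).1; omega
    have hnn : 'n' ∉ (PySem.Str.replace key (String.ofList ['j']) (PySem.Int.toStr a)).toList := by
      rw [pvMem_replace_letter ha0 (by decide)]; rintro ⟨hm, _⟩; exact hn hm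
    have hni : 'i' ∉ (PySem.Str.replace key (String.ofList ['j']) (PySem.Int.toStr a)).toList := by
      rw [pvMem_replace_letter ha0 (by decide)]; rintro ⟨hm, _⟩; exact hi hm
    have hnj : 'j' ∉ (PySem.Str.replace key (String.ofList ['j']) (PySem.Int.toStr a)).toList := by
      rw [pvMem_replace_letter ha0 (by decide)]; rintro ⟨_, hne⟩; exact hne rfl
    rw [pvFullExp_skip hnn, pvFullExp_skip hni, pvFullExp_skip hnj]
  · simp

lemma pvFullExp_of_cnt_zero (naxis : Int) {k : String} (h : pvCnt k.toList = 0) :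
    fullExp naxis ['n', 'i', 'j'] k = [k] := by
  have hn : 'n' ∉ k.toList := by intro hm; simp [pvCnt, hm] at h
  have hi : 'i' ∉ k.toList := by intro hm; simp [pvCnt, hm] at h
  have hj : 'j' ∉ k.toList := by intro hm; simp [pvCnt, hm] at h
  rw [pvFullExp_skip hn, pvFullExp_skip hi, pvFullExp_skip hj]
  rfl

lemma pvStep_len_le (naxis : Int) (hn : naxis ≤ 0) (k : String) :
    (pvStep naxis k).length ≤ 1 := by
  have hr : PySem.List.pyRange 1 (naxis + 1) 1 = [] := PySem.List.pyRange_one_eq_nil (by omega)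
  unfold pvStep
  split_ifs <;> simp [hr]

lemma pvFlatMap_len_le (naxis : Int) (hn : naxis ≤ 0) (t : List String) :
    (t.flatMap (pvStep naxis)).length ≤ t.length := by
  induction t with
  | nil => simp
  | cons x s ih =>
    simp only [List.flatMap_cons, List.length_append, List.length_cons]
    have := pvStep_len_le naxis hn x
    omega

/-- A's pass maps the key list to itself only when no key contains a placeholder letter -/
lemma pvPass_fix (naxis : Int) :
    ∀ keys : List String, expandPass naxis keys = keys → ∀ k ∈ keys, pvCnt k.toList = 0 := by
  intro keys
  rw [expandPass_eq]
  induction keys with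
  | nil => intro _ k hk; cases hk
  | cons k t ih =>
    intro h
    by_cases hck : pvCnt k.toList = 0
    · rw [List.flatMap_cons, pvStep_of_cnt_zero naxis hck] at h
      simp only [List.cons_append, List.nil_append, List.cons.injEq] at h
      intro k' hk'
      rcases List.mem_cons.mp hk' with rfl | hk'
      · exact hck
      · exact ih h.2 k' hk'
    · exfalso
      rcases le_or_gt naxis 0 with hle | hgt
      · have hl : ((k :: t).flatMap (pvStep naxis)).length = (k :: t).length := by rw [h]
        have h1 : (pvStep naxis k).length = 0 := by
          have hr : PySem.List.pyRange 1 (naxis + 1) 1 = [] := PySem.List.pyRange_one_eq_nil (by omega)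
          unfold pvStep
          split_ifs with h1 h2 h3
          · simp [hr]
          · simp [hr]
          · simp [hr]
          · exfalso
            apply hck
            have hn' : 'n' ∉ k.toList := fun hm => h1 ((pvIsIn_n k).mpr hm)
            have hi' : 'i' ∉ k.toList := fun hm => h2 ((pvIsIn_i k).mpr hm)
            have hj' : 'j' ∉ k.toList := fun hm => h3 ((pvIsIn_j k).mpr hm)
            simp [pvCnt, hn', hi', hj']
        have h2 := pvFlatMap_len_le naxis hle t
        simp only [List.flatMap_cons, List.length_append, h1, List.length_cons] at hl
        omega
      · have hr : PySem.List.pyRange 1 (naxis + 1) 1 = 1 :: PySem.List.pyRange 2 (naxis + 1) 1 := by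
          have := PySem.List.pyRange_one_cons (a := 1) (b := naxis + 1) (by omega)
          simpa using this
        have main : ∀ (c : Char) (lit : String), lit = String.ofList [c] → c.isDigit = false → c ∈ k.toList →
            pvStep naxis k = (PySem.List.pyRange 1 (naxis + 1) 1).map (fun i => PySem.Str.replace k lit (PySem.Int.toStr i)) → False := by
          intro c lit hlit hdig hmem hstep
          rw [List.flatMap_cons, hstep, hr] at h
          simp only [List.map_cons, List.cons_append, List.cons.injEq] at h
          have heq : PySem.Str.replace k lit (PySem.Int.toStr 1) = k := h.1
          have hmem' : c ∈ (PySem.Str.replace k lit (PySem.Int.toStr 1)).toList := by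
            rw [heq]; exact hmem
          rw [hlit] at hmem'
          rcases (pvMem_replace_letter (by omega) hdig).mp hmem' with ⟨_, hne⟩
          exact hne rfl
        by_cases h1 : PySem.Str.isIn "n" k = true
        · exact main 'n' "n" rfl (by decide) ((pvIsIn_n k).mp h1) (by unfold pvStep; rw [if_pos h1])
        · by_cases h2 : PySem.Str.isIn "i" k = true
          · exact main 'i' "i" rfl (by decide) ((pvIsIn_i k).mp h2) (by unfold pvStep; rw [if_neg h1, if_pos h2])
          · by_cases h3 : PySem.Str.isIn "j" k = true
            · exact main 'j' "j" rfl (by decide) ((pvIsIn_j k).mp h3) (by unfold pvStep; rw [if_neg h1, if_neg h2, if_pos h3])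
            · apply hck
              have hn' : 'n' ∉ k.toList := fun hm => h1 ((pvIsIn_n k).mpr hm)
              have hi' : 'i' ∉ k.toList := fun hm => h2 ((pvIsIn_i k).mpr hm)
              have hj' : 'j' ∉ k.toList := fun hm => h3 ((pvIsIn_j k).mpr hm)
              simp [pvCnt, hn', hi', hj']

lemma expand_keys_eq_flat (naxis : Int) :
    ∀ (n : Nat) (keys : List String), pvMeasure keys ≤ n →
      expand_keys naxis keys = keys.flatMap (fullExp naxis ['n', 'i', 'j']) := by
  intro n
  induction n with
  | zero =>
    intro keys hm
    have h0 : ∀ k ∈ keys, pvCnt k.toList = 0 := by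
      intro k hk
      have := pvLe_foldr_max (l := keys) hk
      omega
    have hfix : expandPass naxis keys = keys := pvPass_of_all_zero naxis h0
    rw [expand_keys]
    simp only [hfix, dif_pos]
    rw [List.flatMap_congr (fun k hk => pvFullExp_of_cnt_zero naxis (h0 k hk))]
    exact (List.flatMap_singleton' keys).symm
  | succ n ih =>
    intro keys hm
    rw [expand_keys]
    by_cases hfix : expandPass naxis keys = keys
    · have h0 := pvPass_fix naxis keys hfix
      simp only [hfix, dif_pos]
      rw [List.flatMap_congr (fun k hk => pvFullExp_of_cnt_zero naxis (h0 k hk))]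
      exact (List.flatMap_singleton' keys).symm
    · simp only [dif_neg hfix]
      have hlt := pvMeasure_decreases naxis keys hfix
      rw [ih (expandPass naxis keys) (by omega)]
      rw [expandPass_eq, List.flatMap_assoc]
      exact List.flatMap_congr (fun k _ => pvStep_fullExp naxis k)

-- ===== VERDICT (by name: the statement is the Claim_ definition above) =====
theorem expand_keys_spec : Claim_equal_expand_keys := by
  intro naxis keys _
  unfold Spec_expand_keys
  rw [expand_keys_eq_flat naxis (pvMeasure keys) keys le_rfl, expand_keys_alt_eq]
  exact (List.flatMap_congr (fun k _ => altKey_eq_fullExp naxis k)).symm
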